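-- pv_equiv track=rewrite | github.com/jyc0011/backjoon | 프로그래머스/3/388354. 홀짝트리/홀짝트리.py | solution
-- ===== SOURCE A (Python) =====
-- from collections import defaultdict, deque
--
-- def solution(nodes, edges):
--     adj = defaultdict(list)
--     line = defaultdict(int)
--     for u, v in edges:
--         adj[u].append(v)
--         adj[v].append(u)
--         line[u] += 1
--         line[v] += 1
--     visited = set()
--     t, rt = 0, 0
--     for i in nodes:
--         if i not in visited:
--             tree = []
--             q = deque([i])
--             visited.add(i)
--             while q:
--                 node = q.popleft()
--                 tree.append(node)
--                 for n in adj[node]: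
--                     if n not in visited:
--                         visited.add(n)
--                         q.append(n)
--             oeR, oeC = 0, 0
--             for node in tree:
--                 deg = line[node]
--                 if node % 2 == deg % 2:
--                     oeR += 1
--                 if node % 2 == (deg - 1) % 2:
--                     oeC += 1
--             if oeR == 1 and oeC == len(tree) - 1:
--                 t += 1
--             roeR, roeC = 0, 0
--             for node in tree:
--                 deg = line[node]
--                 if node % 2 != deg % 2:
--                     roeR += 1
--                 if node % 2 != (deg - 1) % 2:
--                     roeC += 1
--             if roeR == 1 and roeC == len(tree) - 1:
--                 rt += 1
--     return [t, rt]
-- ===== SOURCE B (Python) =====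
-- def solution(nodes, edges):
--     # Disjoint-set via small-to-large list merging: no graph traversal at all.
--     deg = {}
--     comp = {}      # node -> component id
--     members = {}   # component id -> list of its nodes
--     nid = 0
--     for u, v in edges:
--         deg[u] = deg.get(u, 0) + 1
--         deg[v] = deg.get(v, 0) + 1
--         if u not in comp:
--             comp[u] = nid
--             members[nid] = [u]
--             nid += 1
--         if v not in comp:
--             comp[v] = nid
--             members[nid] = [v]
--             nid += 1
--         a, b = comp[u], comp[v]
--         if a != b:
--             if len(members[a]) < len(members[b]):
--                 a, b = b, a
--             for x in members[b]:
--                 comp[x] = a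
--             members[a] += members[b]
--             del members[b]
--     t = rt = 0
--     seen = set()
--     for i in nodes:
--         if i in seen:
--             continue
--         group = members[comp[i]] if i in comp else [i]
--         seen.update(group)
--         size = len(group)
--         match = sum(1 for x in group if x % 2 == deg.get(x, 0) % 2)
--         if match == 1:
--             t += 1
--         if match == size - 1:
--             rt += 1
--     return [t, rt]
-- ===== Notes on version B (the rewrite author's own statement) =====
-- stated objective: alternative
-- what changed: A's BFS graph traversal (adjacency lists + deque + visited set) is replaced by a disjoint-set union built while reading the edges (small-to-large merging of component member lists, no traversal at all), and the two four-counter classification passes are replaced by a single parity-match count per component using the identity oeC = size - oeR.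
import Mathlib
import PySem

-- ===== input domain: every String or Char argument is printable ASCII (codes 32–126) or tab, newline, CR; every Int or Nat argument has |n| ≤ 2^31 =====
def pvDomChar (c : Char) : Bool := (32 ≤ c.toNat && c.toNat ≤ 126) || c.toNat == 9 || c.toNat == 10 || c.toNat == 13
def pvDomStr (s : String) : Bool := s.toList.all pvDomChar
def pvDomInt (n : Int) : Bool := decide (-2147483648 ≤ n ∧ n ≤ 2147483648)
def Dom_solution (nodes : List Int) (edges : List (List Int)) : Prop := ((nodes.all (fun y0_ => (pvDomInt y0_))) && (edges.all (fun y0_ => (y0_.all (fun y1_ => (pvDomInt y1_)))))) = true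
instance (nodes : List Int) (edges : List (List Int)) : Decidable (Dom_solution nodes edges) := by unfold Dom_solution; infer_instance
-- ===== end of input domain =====

-- B replaces A's BFS component traversal by a disjoint-set union (small-to-large merging of
-- member lists) built while reading the edges, and classifies each component with a single
-- parity-match counter (objective: alternative).

-- ===== PORT A =====
-- the inner `for n in adj[node]: if n not in visited: visited.add(n); q.append(n)` loop
def pushNew (vq : PySem.Set Int × List Int) (ns : List Int) : PySem.Set Int × List Int :=
  ns.foldl (fun vq n =>
    if PySem.Set.contains vq.1 n then vq else (PySem.Set.add vq.1 n, vq.2 ++ [n])) vq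

-- Termination bookkeeping for A's worklist loop (cited by the port's decreasing_by).
def AdjIn (adj : PySem.Dict Int (List Int)) (U : List Int) : Prop :=
  ∀ k x, x ∈ adj.getD k [] → x ∈ U

def unvis (U : List Int) (v : PySem.Set Int) : Nat :=
  (U.dedup.filter (fun x => decide (x ∉ v))).length

theorem filter_len_lt {l : List Int} {p q : Int → Bool} (hpq : ∀ y, q y = true → p y = true)
    {x : Int} (hx : x ∈ l) (hp : p x = true) (hq : q x = false) :
    (l.filter q).length < (l.filter p).length := by
  induction l with
  | nil => cases hx
  | cons a as ih =>
    have hmono : (as.filter q).length ≤ (as.filter p).length := by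
      rw [← List.countP_eq_length_filter, ← List.countP_eq_length_filter]
      exact List.countP_mono_left (fun a _ => hpq a)
    rcases List.mem_cons.1 hx with rfl | hx'
    · rw [List.filter_cons, List.filter_cons, if_pos hp, if_neg (by simp [hq])]
      simp only [List.length_cons]
      omega
    · by_cases hqa : q a = true
      · have hpa := hpq a hqa
        simp only [List.filter_cons, hpa, hqa, if_pos, List.length_cons]
        simpa using Nat.succ_lt_succ (ih hx')
      · simp only [List.filter_cons]
        rw [if_neg hqa]
        split
        · have := ih hx'; simp only [List.length_cons]; omega
        · exact ih hx'

theorem unvis_add_lt {U : List Int} {v : PySem.Set Int} {x : Int}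
    (hxU : x ∈ U) (hxv : x ∉ v) :
    unvis U (PySem.Set.add v x) < unvis U v := by
  unfold unvis
  refine filter_len_lt (p := fun y => decide (y ∉ v)) (q := fun y => decide (y ∉ PySem.Set.add v x))
    (fun y hy => ?_) (List.mem_dedup.2 hxU) (by simpa using hxv) ?_
  · simp only [decide_eq_true_eq] at hy ⊢
    intro hyv; exact hy (by simp [PySem.Set.mem_add, hyv])
  · simp [PySem.Set.mem_add]

theorem pushNew_measure {U : List Int} (ns : List Int) (v : PySem.Set Int) (q : List Int)
    (hns : ∀ x ∈ ns, x ∈ U) :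
    2 * unvis U (pushNew (v, q) ns).1 + (pushNew (v, q) ns).2.length ≤
      2 * unvis U v + q.length := by
  induction ns generalizing v q with
  | nil => simp [pushNew]
  | cons n ns ih =>
    have hstep : pushNew (v, q) (n :: ns) =
        pushNew (if PySem.Set.contains v n then (v, q) else (PySem.Set.add v n, q ++ [n])) ns := by
      rfl
    rw [hstep]
    by_cases hc : PySem.Set.contains v n
    · rw [if_pos hc]; exact (ih v q (fun x hx => hns x (List.mem_cons_of_mem _ hx)))
    · rw [if_neg hc]
      have hnv : n ∉ v := by
        intro hmem
        exact hc (by simpa [PySem.Set.contains_iff] using hmem)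
      have h1 := unvis_add_lt (hns n (List.mem_cons_self)) hnv
      have h2 := ih (PySem.Set.add v n) (q ++ [n]) (fun x hx => hns x (List.mem_cons_of_mem _ hx))
      simp only [List.length_append, List.length_cons, List.length_nil] at h2 ⊢
      omega

-- adj[u].append(v); adj[v].append(u); line[u] += 1; line[v] += 1  over all well-formed edges
-- (a malformed edge — on which the Python raises and which Pre_solution excludes — is skipped).
def buildA (edges : List (List Int)) : PySem.Dict Int (List Int) × PySem.Dict Int Int :=
  edges.foldl (fun st e =>
    match e with
    | [u, v] =>
      ((((st.1.modify u [] (· ++ [v]))).modify v [] (· ++ [u])),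
       (((st.2.modify u 0 (· + 1))).modify v 0 (· + 1)))
    | _ => st) (PySem.Dict.empty, PySem.Dict.empty)

theorem adjIn_foldA (edges : List (List Int)) (st : PySem.Dict Int (List Int) × PySem.Dict Int Int)
    (U : List Int) (hU : ∀ e ∈ edges, ∀ x ∈ e, x ∈ U) (hst : AdjIn st.1 U) :
    AdjIn (edges.foldl (fun st e =>
      match e with
      | [u, v] =>
        ((((st.1.modify u [] (· ++ [v]))).modify v [] (· ++ [u])),
         (((st.2.modify u 0 (· + 1))).modify v 0 (· + 1)))
      | _ => st) st).1 U := by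
  induction edges generalizing st with
  | nil => exact hst
  | cons e es ih =>
    refine ih _ (fun e' he' => hU e' (List.mem_cons_of_mem _ he')) ?_
    match e with
    | [] => exact hst
    | [_] => exact hst
    | (u :: v :: _ :: _) => exact hst
    | [u, v] =>
      have hUe : ∀ y ∈ [u, v], y ∈ U := hU [u, v] (List.mem_cons_self)
      intro k x hx
      simp only [PySem.Dict.getD_modify] at hx
      split at hx
      · rcases List.mem_append.1 hx with h | h
        · split at h
          · rcases List.mem_append.1 h with h' | h'
            · exact hst _ _ h'
            · rw [List.mem_singleton.1 h']; exact hUe v (by simp)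
          · exact hst _ _ h
        · rw [List.mem_singleton.1 h]; exact hUe u (by simp)
      · split at hx
        · rcases List.mem_append.1 hx with h | h
          · exact hst _ _ h
          · rw [List.mem_singleton.1 h]; exact hUe v (by simp)
        · exact hst _ _ hx

theorem adjIn_buildA (edges : List (List Int)) : AdjIn (buildA edges).1 (edges.flatMap id) := by
  refine adjIn_foldA edges _ _ (fun e he x hx => List.mem_flatMap.2 ⟨e, he, hx⟩) ?_
  intro k x hx
  simp [PySem.Dict.getD_empty] at hx

-- `while q: node = q.popleft(); tree.append(node); <push unvisited neighbours>`
def bfsLoop (adj : PySem.Dict Int (List Int)) (U : List Int) (h : AdjIn adj U)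
    (visited : PySem.Set Int) (q : List Int) (tree : List Int) : List Int × PySem.Set Int :=
  match q with
  | [] => (tree, visited)
  | node :: rest =>
    bfsLoop adj U h (pushNew (visited, rest) (adj.getD node [])).1
      (pushNew (visited, rest) (adj.getD node [])).2 (tree ++ [node])
termination_by 2 * unvis U visited + q.length
decreasing_by
  have := pushNew_measure (U := U) (adj.getD node []) visited rest (fun x hx => h node x hx)
  simp only [List.length_cons]
  omega

-- the two classification passes of A, each a fold over the component's node list
def countOE (line : PySem.Dict Int Int) (tree : List Int) : Int × Int :=
  tree.foldl (fun p node =>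
    ((if PySem.Int.mod node 2 = PySem.Int.mod (line.getD node 0) 2 then p.1 + 1 else p.1),
     (if PySem.Int.mod node 2 = PySem.Int.mod (line.getD node 0 - 1) 2 then p.2 + 1 else p.2)))
    (0, 0)

def countROE (line : PySem.Dict Int Int) (tree : List Int) : Int × Int :=
  tree.foldl (fun p node =>
    ((if PySem.Int.mod node 2 ≠ PySem.Int.mod (line.getD node 0) 2 then p.1 + 1 else p.1),
     (if PySem.Int.mod node 2 ≠ PySem.Int.mod (line.getD node 0 - 1) 2 then p.2 + 1 else p.2)))
    (0, 0)

def stepA (adj : PySem.Dict Int (List Int)) (line : PySem.Dict Int Int) (U : List Int)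
    (h : AdjIn adj U) (st : PySem.Set Int × Int × Int) (i : Int) : PySem.Set Int × Int × Int :=
  if PySem.Set.contains st.1 i then st
  else
    let r := bfsLoop adj U h (PySem.Set.add st.1 i) [i] []
    let oe := countOE line r.1
    let t := if oe.1 = 1 ∧ oe.2 = (r.1.length : Int) - 1 then st.2.1 + 1 else st.2.1
    let roe := countROE line r.1
    let rt := if roe.1 = 1 ∧ roe.2 = (r.1.length : Int) - 1 then st.2.2 + 1 else st.2.2
    (r.2, t, rt)

def solution (nodes : List Int) (edges : List (List Int)) : List Int :=
  let bl := buildA edges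
  let st := nodes.foldl (stepA bl.1 bl.2 (edges.flatMap id) (adjIn_buildA edges))
    (PySem.Set.empty, 0, 0)
  [st.2.1, st.2.2]

-- ===== PORT B =====
-- `if u not in comp: comp[u] = nid; members[nid] = [u]; nid += 1`
def ufEnsure (st : PySem.Dict Int Int × PySem.Dict Int (List Int) × Int) (u : Int) :
    PySem.Dict Int Int × PySem.Dict Int (List Int) × Int :=
  if st.1.contains u then st
  else (st.1.insert u st.2.2, st.2.1.insert st.2.2 [u], st.2.2 + 1)

-- merge the member list of id ab.2 into that of id ab.1
def ufMerge (st2 : PySem.Dict Int Int × PySem.Dict Int (List Int) × Int) (ab : Int × Int) :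
    PySem.Dict Int Int × PySem.Dict Int (List Int) × Int :=
  ((st2.2.1.getD ab.2 []).foldl (fun c x => c.insert x ab.1) st2.1,
   (st2.2.1.insert ab.1 (st2.2.1.getD ab.1 [] ++ st2.2.1.getD ab.2 [])).erase ab.2,
   st2.2.2)

-- `a, b = comp[u], comp[v]; if a != b: <swap to small-to-large>; <merge>`
def ufUnion2 (st2 : PySem.Dict Int Int × PySem.Dict Int (List Int) × Int) (u v : Int) :
    PySem.Dict Int Int × PySem.Dict Int (List Int) × Int :=
  if st2.1.getD u 0 = st2.1.getD v 0 then st2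
  else ufMerge st2
    (if (st2.2.1.getD (st2.1.getD u 0) []).length < (st2.2.1.getD (st2.1.getD v 0) []).length
     then (st2.1.getD v 0, st2.1.getD u 0) else (st2.1.getD u 0, st2.1.getD v 0))

-- register both endpoints, then merge the smaller member list into the larger
def ufUnion (st : PySem.Dict Int Int × PySem.Dict Int (List Int) × Int) (u v : Int) :
    PySem.Dict Int Int × PySem.Dict Int (List Int) × Int :=
  ufUnion2 (ufEnsure (ufEnsure st u) v) u v

-- one pass over the edges: degree counts and disjoint-set union (malformed edges — excluded
-- by Pre_solution — are skipped)
def buildB (edges : List (List Int)) :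
    PySem.Dict Int Int × PySem.Dict Int Int × PySem.Dict Int (List Int) × Int :=
  edges.foldl (fun st e =>
    match e with
    | [u, v] =>
      let d1 := st.1.insert u (st.1.getD u 0 + 1)
      let d2 := d1.insert v (d1.getD v 0 + 1)
      (d2, ufUnion st.2 u v)
    | _ => st) (PySem.Dict.empty, PySem.Dict.empty, PySem.Dict.empty, 0)

-- one iteration of B's `for i in nodes` loop
def stepB (deg : PySem.Dict Int Int) (comp : PySem.Dict Int Int)
    (members : PySem.Dict Int (List Int)) (st : PySem.Set Int × Int × Int) (i : Int) :
    PySem.Set Int × Int × Int :=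
  if PySem.Set.contains st.1 i then st
  else
    let group := if comp.contains i then members.getD (comp.getD i 0) [] else [i]
    let seen := PySem.Set.update st.1 group
    let m := group.foldl (fun acc x =>
      if PySem.Int.mod x 2 = PySem.Int.mod (deg.getD x 0) 2 then acc + 1 else acc) (0 : Int)
    (seen,
     (if m = 1 then st.2.1 + 1 else st.2.1),
     (if m = (group.length : Int) - 1 then st.2.2 + 1 else st.2.2))

def solution_alt (nodes : List Int) (edges : List (List Int)) : List Int :=
  let bl := buildB edges
  let r := nodes.foldl (stepB bl.1 bl.2.1 bl.2.2.1) (PySem.Set.empty, 0, 0)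
  [r.2.1, r.2.2]

-- ===== PRECONDITION & SPEC =====
-- Pre_ excludes only edges that are not two-element lists, on which A's `for u, v in edges`
-- unpacking raises ValueError.
def Pre_solution (nodes : List Int) (edges : List (List Int)) : Prop :=
  ∀ e ∈ edges, e.length = 2
instance (nodes : List Int) (edges : List (List Int)) : Decidable (Pre_solution nodes edges) := by
  unfold Pre_solution; infer_instance

def pvWitness_solution : List Int × List (List Int) := ([1, 2, 3, 7], [[1, 2], [2, 3]])

def Spec_solution (nodes : List Int) (edges : List (List Int)) (out : List Int) : Prop :=
  out = solution_alt nodes edges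
instance (nodes : List Int) (edges : List (List Int)) (out : List Int) :
    Decidable (Spec_solution nodes edges out) := by unfold Spec_solution; infer_instance

-- ===== CLAIM (what is proved, stated in full; the proofs are below) =====
def Claim_equal_solution : Prop := ∀ (nodes : List Int) (edges : List (List Int)),
  Dom_solution nodes edges → Pre_solution nodes edges →
  Spec_solution nodes edges (solution nodes edges)

-- ===== LEMMAS AND PROOFS =====

-- the undirected edge relation, connectivity, and the endpoint set of the edge list
def ER (edges : List (List Int)) (a b : Int) : Prop := [a, b] ∈ edges ∨ [b, a] ∈ edges

def Conn (edges : List (List Int)) (a b : Int) : Prop := Relation.ReflTransGen (ER edges) a b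

def Endp (edges : List (List Int)) (x : Int) : Prop := ∃ e ∈ edges, x ∈ e

theorem conn_symm {edges : List (List Int)} {a b : Int} (h : Conn edges a b) : Conn edges b a :=
  Relation.ReflTransGen.symmetric (fun _ _ hr => hr.symm) h

theorem conn_trans {edges : List (List Int)} {a b c : Int}
    (h1 : Conn edges a b) (h2 : Conn edges b c) : Conn edges a c :=
  Relation.ReflTransGen.trans h1 h2

theorem conn_of_not_endp {edges : List (List Int)} {i y : Int}
    (h : ¬ Endp edges i) (hc : Conn edges i y) : y = i := by
  rcases Relation.ReflTransGen.cases_head hc with rfl | ⟨c, hic, _⟩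
  · rfl
  · exfalso
    rcases hic with he | he
    · exact h ⟨[i, c], he, by simp⟩
    · exact h ⟨[c, i], he, by simp⟩

theorem ER_append_singleton {E : List (List Int)} {u v a b : Int} :
    ER (E ++ [[u, v]]) a b ↔ ER E a b ∨ (a = u ∧ b = v) ∨ (a = v ∧ b = u) := by
  unfold ER
  simp only [List.mem_append, List.mem_singleton, List.cons.injEq, and_true]
  tauto

theorem conn_mono_append {E : List (List Int)} {e : List Int} {a b : Int}
    (h : Conn E a b) : Conn (E ++ [e]) a b := by
  refine Relation.ReflTransGen.mono (fun x y hxy => ?_) h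
  unfold ER at hxy ⊢
  rcases hxy with h' | h'
  · exact Or.inl (List.mem_append.2 (Or.inl h'))
  · exact Or.inr (List.mem_append.2 (Or.inl h'))

-- adding one edge joins exactly the two endpoint classes
theorem conn_append_iff {E : List (List Int)} {u v x y : Int} :
    Conn (E ++ [[u, v]]) x y ↔
      Conn E x y ∨ (Conn E x u ∧ Conn E v y) ∨ (Conn E x v ∧ Conn E u y) := by
  constructor
  · intro h
    induction h with
    | refl => exact Or.inl Relation.ReflTransGen.refl
    | tail hxa hab ih =>
      rcases ER_append_singleton.1 hab with he | ⟨rfl, rfl⟩ | ⟨rfl, rfl⟩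
      · rcases ih with h1 | ⟨h1, h2⟩ | ⟨h1, h2⟩
        · exact Or.inl (h1.tail he)
        · exact Or.inr (Or.inl ⟨h1, h2.tail he⟩)
        · exact Or.inr (Or.inr ⟨h1, h2.tail he⟩)
      · rcases ih with h1 | ⟨h1, h2⟩ | ⟨h1, h2⟩
        · exact Or.inr (Or.inl ⟨h1, Relation.ReflTransGen.refl⟩)
        · exact Or.inr (Or.inl ⟨h1, Relation.ReflTransGen.refl⟩)
        · exact Or.inl h1
      · rcases ih with h1 | ⟨h1, h2⟩ | ⟨h1, h2⟩
        · exact Or.inr (Or.inr ⟨h1, Relation.ReflTransGen.refl⟩)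
        · exact Or.inl h1
        · exact Or.inr (Or.inr ⟨h1, Relation.ReflTransGen.refl⟩)
  · have hstep : Conn (E ++ [[u, v]]) u v :=
      Relation.ReflTransGen.single (ER_append_singleton.2 (Or.inr (Or.inl ⟨rfl, rfl⟩)))
    rintro (h | ⟨h1, h2⟩ | ⟨h1, h2⟩)
    · exact conn_mono_append h
    · exact conn_trans (conn_mono_append h1) (conn_trans hstep (conn_mono_append h2))
    · exact conn_trans (conn_mono_append h1)
        (conn_trans (conn_symm hstep) (conn_mono_append h2))

-- A's adjacency dict holds exactly the edge relation
theorem memA_fold (E : List (List Int)) :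
    ∀ (st : PySem.Dict Int (List Int) × PySem.Dict Int Int) (a b : Int),
    (b ∈ (E.foldl (fun st e =>
      match e with
      | [u, v] =>
        ((((st.1.modify u [] (· ++ [v]))).modify v [] (· ++ [u])),
         (((st.2.modify u 0 (· + 1))).modify v 0 (· + 1)))
      | _ => st) st).1.getD a []) ↔ b ∈ st.1.getD a [] ∨ ER E a b := by
  induction E with
  | nil => intro st a b; simp [ER]
  | cons e es ih =>
    intro st a b
    match e with
    | [] =>
      rw [List.foldl_cons]
      rw [ih st a b]
      have : ER ([] :: es) a b ↔ ER es a b := by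
        unfold ER; simp
      rw [this]
    | [w] =>
      rw [List.foldl_cons]
      rw [ih st a b]
      have : ER ([w] :: es) a b ↔ ER es a b := by
        unfold ER; simp
      rw [this]
    | (u :: v :: w :: r) =>
      rw [List.foldl_cons]
      rw [ih st a b]
      have : ER ((u :: v :: w :: r) :: es) a b ↔ ER es a b := by
        unfold ER
        constructor
        · rintro (h | h) <;> rcases List.mem_cons.1 h with h' | h' <;>
            first | (exfalso; simp at h') | tauto
        · rintro (h | h) <;> [exact Or.inl (List.mem_cons_of_mem _ h);
            exact Or.inr (List.mem_cons_of_mem _ h)]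
      rw [this]
    | [u, v] =>
      rw [List.foldl_cons]
      rw [ih _ a b]
      have hER : ER (([u, v]) :: es) a b ↔ ((a = u ∧ b = v) ∨ (a = v ∧ b = u)) ∨ ER es a b := by
        unfold ER
        simp only [List.mem_cons, List.cons.injEq, and_true]
        tauto
      rw [hER]
      have hmem : b ∈ ((st.1.modify u [] (· ++ [v])).modify v [] (· ++ [u])).getD a [] ↔
          b ∈ st.1.getD a [] ∨ (a = u ∧ b = v) ∨ (a = v ∧ b = u) := by
        simp only [PySem.Dict.getD_modify]
        by_cases hav : a = v <;> by_cases hau : a = u <;>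
          subst_vars <;> simp_all <;> tauto
      rw [hmem]
      tauto

theorem memA (edges : List (List Int)) (a b : Int) :
    (b ∈ (buildA edges).1.getD a []) ↔ ER edges a b := by
  rw [buildA, memA_fold edges _ a b, PySem.Dict.getD_empty]
  simp

-- B's degree dict is (pointwise) A's line dict: insert k (getD k 0 + 1) IS modify k 0 (+1)
theorem degB_eq_lineA_fold (E : List (List Int))
    (sA : PySem.Dict Int (List Int) × PySem.Dict Int Int)
    (sB : PySem.Dict Int Int × PySem.Dict Int Int × PySem.Dict Int (List Int) × Int)
    (h : sB.1 = sA.2) :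
    (E.foldl (fun st e =>
      match e with
      | [u, v] =>
        let d1 := st.1.insert u (st.1.getD u 0 + 1)
        let d2 := d1.insert v (d1.getD v 0 + 1)
        (d2, ufUnion st.2 u v)
      | _ => st) sB).1 =
    (E.foldl (fun st e =>
      match e with
      | [u, v] =>
        ((((st.1.modify u [] (· ++ [v]))).modify v [] (· ++ [u])),
         (((st.2.modify u 0 (· + 1))).modify v 0 (· + 1)))
      | _ => st) sA).2 := by
  induction E generalizing sA sB with
  | nil => exact h
  | cons e es ih =>
    match e with
    | [] => exact ih sA sB h
    | [_] => exact ih sA sB h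
    | (u :: v :: _ :: _) => exact ih sA sB h
    | [u, v] =>
      refine ih _ _ ?_
      simp only [PySem.Dict.modify, h]

theorem degB_eq_lineA (edges : List (List Int)) : (buildB edges).1 = (buildA edges).2 :=
  degB_eq_lineA_fold edges _ _ rfl

-- similarly, B's union-find state is the fold of ufUnion over the well-formed edges
theorem buildB_snd (E : List (List Int))
    (sB : PySem.Dict Int Int × PySem.Dict Int Int × PySem.Dict Int (List Int) × Int) :
    (E.foldl (fun st e =>
      match e with
      | [u, v] =>
        let d1 := st.1.insert u (st.1.getD u 0 + 1)
        let d2 := d1.insert v (d1.getD v 0 + 1)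
        (d2, ufUnion st.2 u v)
      | _ => st) sB).2 =
    E.foldl (fun s e =>
      match e with
      | [u, v] => ufUnion s u v
      | _ => s) sB.2 := by
  induction E generalizing sB with
  | nil => rfl
  | cons e es ih =>
    match e with
    | [] => exact ih sB
    | [_] => exact ih sB
    | (u :: v :: _ :: _) => exact ih sB
    | [u, v] => exact ih _

-- get? through erase (no PySem lemma exists for erase)
theorem get?_erase {ν : Type} (d : PySem.Dict Int ν) (k k' : Int) :
    (d.erase k).get? k' = if k' = k then none else d.get? k' := by
  show (PySem.Dict.mk (d.items.filter (fun p => !p.1 == k))).get? k'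
      = if k' = k then none else d.get? k'
  have hg : ∀ l : List (Int × ν), (PySem.Dict.mk l).get? k'
      = Option.map Prod.snd (l.find? (fun p => p.1 == k')) := fun l => rfl
  rw [hg]
  have hd : d.get? k' = Option.map Prod.snd (d.items.find? (fun p => p.1 == k')) := rfl
  rw [hd]
  induction d.items with
  | nil => simp
  | cons p t ih =>
    obtain ⟨a, b⟩ := p
    by_cases hak : a = k <;> by_cases hak' : a = k' <;>
      simp_all [List.find?_cons]

-- get? through the reassignment loop `for x in members[b]: comp[x] = a`
theorem reassign_get? (lb : List Int) (a' : Int) (comp : PySem.Dict Int Int) (x : Int) :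
    ((lb.foldl (fun c y => c.insert y a') comp).get? x) =
      if x ∈ lb then some a' else comp.get? x := by
  induction lb generalizing comp with
  | nil => simp
  | cons h t ih =>
    rw [List.foldl_cons, ih]
    by_cases hxt : x ∈ t
    · simp [hxt]
    · simp [hxt, PySem.Dict.get?_insert]

-- the union-find invariant: comp keys = K, ids below nid, members[comp x] is x's
-- connectivity class (duplicate-free), and member lists point back to their id
def UFI (E : List (List Int)) (K : Int → Prop)
    (st : PySem.Dict Int Int × PySem.Dict Int (List Int) × Int) : Prop :=
  (∀ x, st.1.contains x = true ↔ K x) ∧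
  (∀ x c, st.1.get? x = some c → c < st.2.2) ∧
  (∀ x c, st.1.get? x = some c →
    ∃ l, st.2.1.get? c = some l ∧ l.Nodup ∧ (∀ y, y ∈ l ↔ Conn E x y)) ∧
  (∀ c l, st.2.1.get? c = some l → ∀ y ∈ l, st.1.get? y = some c)

theorem ufEnsure_inv {E : List (List Int)} {K : Int → Prop}
    {st : PySem.Dict Int Int × PySem.Dict Int (List Int) × Int} {u : Int}
    (h : UFI E K st) (hK : ¬ K u → ¬ Endp E u) :
    UFI E (fun x => K x ∨ x = u) (ufEnsure st u) := by
  obtain ⟨h1, h2, h3, h4⟩ := h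
  by_cases hc : st.1.contains u = true
  · rw [ufEnsure, if_pos hc]
    have hKu : K u := (h1 u).1 hc
    refine ⟨fun x => ?_, h2, h3, h4⟩
    rw [h1 x]
    constructor
    · exact Or.inl
    · rintro (h | rfl)
      · exact h
      · exact hKu
  · rw [ufEnsure, if_neg hc]
    have hKu : ¬ K u := fun hk => hc ((h1 u).2 hk)
    have hEu : ¬ Endp E u := hK hKu
    have hgu : st.1.get? u = none := by
      cases hg : st.1.get? u with
      | none => rfl
      | some c =>
        exact absurd (by rw [PySem.Dict.contains_eq_isSome_get?, hg]; rfl) hc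
    refine ⟨fun x => ?_, fun x c hx => ?_, fun x c hx => ?_, fun c l hl => ?_⟩
    · simp only [PySem.Dict.contains_insert, Bool.or_eq_true, beq_iff_eq]
      rw [h1 x]
      tauto
    · rw [PySem.Dict.get?_insert] at hx
      split at hx
      · cases hx
        show st.2.2 < st.2.2 + 1
        omega
      · have := h2 x c hx
        show c < st.2.2 + 1
        omega
    · rw [PySem.Dict.get?_insert] at hx
      split at hx
      · rename_i hxu
        cases hx
        refine ⟨[u], PySem.Dict.get?_insert_self _ _ _, by simp, fun y => ?_⟩
        constructor
        · intro hy
          rcases List.mem_singleton.1 hy with rfl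
          rw [hxu]
          exact Relation.ReflTransGen.refl
        · intro hconn
          rw [hxu] at hconn
          rw [conn_of_not_endp hEu hconn]
          simp
      · obtain ⟨l, hl, hnd, hcl⟩ := h3 x c hx
        have hcnid : c ≠ st.2.2 := by have := h2 x c hx; omega
        exact ⟨l, by rw [PySem.Dict.get?_insert_of_ne _ _ hcnid]; exact hl, hnd, hcl⟩
    · by_cases hcn : c = st.2.2
      · subst hcn
        rw [PySem.Dict.get?_insert_self] at hl
        cases hl
        intro y hy
        rw [List.mem_singleton.1 hy]
        exact PySem.Dict.get?_insert_self _ _ _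
      · rw [PySem.Dict.get?_insert_of_ne _ _ hcn] at hl
        intro y hy
        have hyc := h4 c l hl y hy
        have hyu : y ≠ u := by
          intro hyu
          rw [hyu, hgu] at hyc
          cases hyc
        rw [PySem.Dict.get?_insert_of_ne _ _ hyu]
        exact hyc

theorem endp_append {E : List (List Int)} {u v x : Int} :
    Endp (E ++ [[u, v]]) x ↔ Endp E x ∨ x = u ∨ x = v := by
  unfold Endp
  simp only [List.mem_append, List.mem_singleton]
  constructor
  · rintro ⟨e, (he | rfl), hx⟩
    · exact Or.inl ⟨e, he, hx⟩
    · simp only [List.mem_cons, List.mem_singleton, List.not_mem_nil, or_false] at hx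
      tauto
  · rintro (⟨e, he, hx⟩ | rfl | rfl)
    · exact ⟨e, Or.inl he, hx⟩
    · exact ⟨[x, v], Or.inr rfl, by simp⟩
    · exact ⟨[u, x], Or.inr rfl, by simp⟩

theorem conn_append_of_conn {E : List (List Int)} {u v x y : Int} (huv : Conn E u v) :
    Conn (E ++ [[u, v]]) x y ↔ Conn E x y := by
  rw [conn_append_iff]
  constructor
  · rintro (h | ⟨h1, h2⟩ | ⟨h1, h2⟩)
    · exact h
    · exact conn_trans h1 (conn_trans huv h2)
    · exact conn_trans h1 (conn_trans (conn_symm huv) h2)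
  · exact Or.inl

theorem conn_append_wz {E : List (List Int)} {u v w z x y : Int}
    (hwz : (w = u ∧ z = v) ∨ (w = v ∧ z = u)) :
    Conn (E ++ [[u, v]]) x y ↔
      Conn E x y ∨ (Conn E x w ∧ Conn E z y) ∨ (Conn E x z ∧ Conn E w y) := by
  rcases hwz with ⟨rfl, rfl⟩ | ⟨rfl, rfl⟩
  · exact conn_append_iff
  · rw [conn_append_iff]
    tauto

theorem ufMerge_inv {E : List (List Int)} {K : Int → Prop}
    {st2 : PySem.Dict Int Int × PySem.Dict Int (List Int) × Int} {u v w z a' b' : Int}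
    (g : UFI E K st2)
    (hwz : (w = u ∧ z = v) ∨ (w = v ∧ z = u))
    (hw : st2.1.get? w = some a') (hz : st2.1.get? z = some b') (hab : a' ≠ b') :
    UFI (E ++ [[u, v]]) K (ufMerge st2 (a', b')) := by
  obtain ⟨g1, g2, g3, g4⟩ := g
  obtain ⟨la, hla, hland, hlac⟩ := g3 w a' hw
  obtain ⟨lb, hlb, hlbnd, hlbc⟩ := g3 z b' hz
  have hlaD : st2.2.1.getD a' [] = la := by
    rw [PySem.Dict.getD_eq_get?_getD, hla]; rfl
  have hlbD : st2.2.1.getD b' [] = lb := by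
    rw [PySem.Dict.getD_eq_get?_getD, hlb]; rfl
  -- members of each list point at their own id
  have hmemA : ∀ y ∈ la, st2.1.get? y = some a' := g4 a' la hla
  have hmemB : ∀ y ∈ lb, st2.1.get? y = some b' := g4 b' lb hlb
  have hdisj : ∀ y, y ∈ la → y ∈ lb → False := by
    intro y h1 h2
    have := hmemA y h1
    have := hmemB y h2
    simp_all
  -- a node's own class list contains it
  have hself : ∀ x c, st2.1.get? x = some c → ∃ l, st2.2.1.get? c = some l ∧ x ∈ l ∧
      (∀ y, y ∈ l ↔ Conn E x y) := by
    intro x c hx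
    obtain ⟨l, hl, _, hcl⟩ := g3 x c hx
    exact ⟨l, hl, (hcl x).2 Relation.ReflTransGen.refl, hcl⟩
  -- the new comp lookup
  have hre : ∀ x, (ufMerge st2 (a', b')).1.get? x =
      if x ∈ lb then some a' else st2.1.get? x := by
    intro x
    show ((st2.2.1.getD b' []).foldl (fun c y => c.insert y a') st2.1).get? x = _
    rw [hlbD, reassign_get?]
  -- the new members lookup
  have hme : ∀ c, (ufMerge st2 (a', b')).2.1.get? c =
      if c = b' then none else if c = a' then some (la ++ lb) else st2.2.1.get? c := by
    intro c
    show ((st2.2.1.insert a' (st2.2.1.getD a' [] ++ st2.2.1.getD b' [])).erase b').get? c = _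
    rw [get?_erase]
    by_cases hcb : c = b'
    · simp [hcb]
    · rw [if_neg hcb, if_neg hcb]
      by_cases hca : c = a'
      · subst hca
        rw [PySem.Dict.get?_insert_self, hlaD, hlbD]
        simp
      · rw [PySem.Dict.get?_insert_of_ne _ _ hca, if_neg hca]
  have hnid : (ufMerge st2 (a', b')).2.2 = st2.2.2 := rfl
  -- class union characterization
  have hclassU : ∀ x, (Conn E w x ∨ Conn E z x) → ∀ y,
      (y ∈ la ++ lb ↔ Conn (E ++ [[u, v]]) x y) := by
    intro x hx y
    rw [List.mem_append, hlac, hlbc, conn_append_wz hwz]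
    constructor
    · rintro (h | h)
      · rcases hx with hx | hx
        · exact Or.inl (conn_trans (conn_symm hx) h)
        · exact Or.inr (Or.inr ⟨conn_symm hx, h⟩)
      · rcases hx with hx | hx
        · exact Or.inr (Or.inl ⟨conn_symm hx, h⟩)
        · exact Or.inl (conn_trans (conn_symm hx) h)
    · rintro (h | ⟨h1, h2⟩ | ⟨h1, h2⟩)
      · rcases hx with hx | hx
        · exact Or.inl (conn_trans hx h)
        · exact Or.inr (conn_trans hx h)
      · exact Or.inr h2
      · exact Or.inl h2
  refine ⟨fun x => ?_, fun x c hx => ?_, fun x c hx => ?_, fun c l hl => ?_⟩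
  · rw [PySem.Dict.contains_eq_isSome_get?, hre x]
    by_cases hx : x ∈ lb
    · simp only [hx, if_pos, Option.isSome_some]
      have : st2.1.contains x = true := by
        rw [PySem.Dict.contains_eq_isSome_get?, hmemB x hx]; rfl
      simp [(g1 x).1 this]
    · rw [if_neg hx, ← PySem.Dict.contains_eq_isSome_get?]
      exact g1 x
  · rw [hre x] at hx
    rw [hnid]
    split at hx
    · cases hx; exact g2 w a' hw
    · exact g2 x c hx
  · rw [hre x] at hx
    by_cases hxlb : x ∈ lb
    · rw [if_pos hxlb] at hx
      cases hx
      refine ⟨la ++ lb, by rw [hme]; simp [hab], ?_, ?_⟩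
      · exact List.Nodup.append hland hlbnd (fun y h1 h2 => hdisj y h1 h2)
      · exact hclassU x (Or.inr ((hlbc x).1 hxlb))
    · rw [if_neg hxlb] at hx
      by_cases hca : c = a'
      · subst hca
        obtain ⟨l0, hl0, hxl0, hcl0⟩ := hself x _ hx
        rw [hla] at hl0
        cases hl0
        refine ⟨la ++ lb, by rw [hme]; simp [hab], ?_, ?_⟩
        · exact List.Nodup.append hland hlbnd (fun y h1 h2 => hdisj y h1 h2)
        · exact hclassU x (Or.inl ((hlac x).1 hxl0))
      · have hcb : c ≠ b' := by
          intro hcb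
          subst hcb
          obtain ⟨l0, hl0, hxl0, _⟩ := hself x _ hx
          rw [hlb] at hl0
          cases hl0
          exact hxlb hxl0
        obtain ⟨l, hl, hnd, hcl⟩ := g3 x c hx
        refine ⟨l, by rw [hme, if_neg hcb, if_neg hca]; exact hl, hnd, fun y => ?_⟩
        rw [hcl y, conn_append_wz hwz]
        have hnw : ¬ Conn E x w := by
          intro hc
          have : w ∈ l := (hcl w).2 hc
          have := g4 c l hl w this
          rw [hw] at this
          cases this
          exact hca rfl
        have hnz : ¬ Conn E x z := by
          intro hc
          have : z ∈ l := (hcl z).2 hc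
          have := g4 c l hl z this
          rw [hz] at this
          cases this
          exact hcb rfl
        tauto
  · rw [hme] at hl
    by_cases hcb : c = b'
    · rw [if_pos hcb] at hl; cases hl
    · rw [if_neg hcb] at hl
      by_cases hca : c = a'
      · rw [if_pos hca] at hl
        cases hl
        subst hca
        intro y hy
        rw [hre y]
        rcases List.mem_append.1 hy with h | h
        · rw [if_neg (fun hb => hdisj y h hb)]
          exact hmemA y h
        · rw [if_pos h]
      · rw [if_neg hca] at hl
        intro y hy
        have hyc := g4 c l hl y hy
        rw [hre y]
        have : y ∉ lb := by
          intro hylb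
          have := hmemB y hylb
          rw [hyc] at this
          cases this
          exact hcb rfl
        rw [if_neg this]
        exact hyc

theorem ufUnion_inv {E : List (List Int)}
    {st : PySem.Dict Int Int × PySem.Dict Int (List Int) × Int}
    {u v : Int} (h : UFI E (Endp E) st) :
    UFI (E ++ [[u, v]]) (Endp (E ++ [[u, v]])) (ufUnion st u v) := by
  have h1 : UFI E (fun x => Endp E x ∨ x = u) (ufEnsure st u) :=
    ufEnsure_inv h (fun hk => hk)
  have h2 : UFI E (fun x => (Endp E x ∨ x = u) ∨ x = v) (ufEnsure (ufEnsure st u) v) :=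
    ufEnsure_inv h1 (fun hk hv => hk (Or.inl hv))
  set st2 := ufEnsure (ufEnsure st u) v with hst2
  have hKiff : ∀ x, ((Endp E x ∨ x = u) ∨ x = v) ↔ Endp (E ++ [[u, v]]) x := by
    intro x
    rw [endp_append]
    tauto
  have hKcong : ∀ (K K' : Int → Prop)
      (s : PySem.Dict Int Int × PySem.Dict Int (List Int) × Int),
      (∀ x, K x ↔ K' x) → UFI (E ++ [[u, v]]) K s → UFI (E ++ [[u, v]]) K' s := by
    intro K K' s hiff ⟨a1, a2, a3, a4⟩
    exact ⟨fun x => (a1 x).trans (hiff x), a2, a3, a4⟩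
  obtain ⟨g1, g2, g3, g4⟩ := h2
  have hcu : st2.1.contains u = true := (g1 u).2 (Or.inl (Or.inr rfl))
  have hcv : st2.1.contains v = true := (g1 v).2 (Or.inr rfl)
  have hu : st2.1.get? u = some (st2.1.getD u 0) := by
    rw [PySem.Dict.contains_eq_isSome_get?] at hcu
    cases hg : st2.1.get? u with
    | none => rw [hg] at hcu; cases hcu
    | some c => rw [PySem.Dict.getD_eq_get?_getD, hg]; rfl
  have hv : st2.1.get? v = some (st2.1.getD v 0) := by
    rw [PySem.Dict.contains_eq_isSome_get?] at hcv
    cases hg : st2.1.get? v with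
    | none => rw [hg] at hcv; cases hcv
    | some c => rw [PySem.Dict.getD_eq_get?_getD, hg]; rfl
  rw [ufUnion, ← hst2, ufUnion2]
  by_cases heq : st2.1.getD u 0 = st2.1.getD v 0
  · rw [if_pos heq]
    -- u and v already connected: the new edge changes no class
    have huv : Conn E u v := by
      obtain ⟨lu, hlu, _, hluc⟩ := g3 u _ hu
      obtain ⟨lv, hlv, _, hlvc⟩ := g3 v _ hv
      rw [heq, hlv] at hlu
      cases hlu
      exact (hluc v).1 ((hlvc v).2 Relation.ReflTransGen.refl)
    refine hKcong _ _ _ hKiff ⟨g1, g2, fun x c hx => ?_, g4⟩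
    obtain ⟨l, hl, hnd, hcl⟩ := g3 x c hx
    refine ⟨l, hl, hnd, fun y => ?_⟩
    rw [hcl y, conn_append_of_conn huv]
  · rw [if_neg heq]
    refine hKcong _ _ _ hKiff ?_
    by_cases hlt : (st2.2.1.getD (st2.1.getD u 0) []).length <
        (st2.2.1.getD (st2.1.getD v 0) []).length
    · rw [if_pos hlt]
      exact ufMerge_inv ⟨g1, g2, g3, g4⟩ (Or.inr ⟨rfl, rfl⟩) hv hu (fun hh => heq hh.symm)
    · rw [if_neg hlt]
      exact ufMerge_inv ⟨g1, g2, g3, g4⟩ (Or.inl ⟨rfl, rfl⟩) hu hv heq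

theorem ufFold_inv (E : List (List Int)) :
    ∀ (done : List (List Int)) (st : PySem.Dict Int Int × PySem.Dict Int (List Int) × Int),
    (∀ e ∈ E, e.length = 2) → UFI done (Endp done) st →
    UFI (done ++ E) (Endp (done ++ E))
      (E.foldl (fun s e =>
        match e with
        | [u, v] => ufUnion s u v
        | _ => s) st) := by
  induction E with
  | nil => intro done st _ h; simpa using h
  | cons e es ih =>
    intro done st h2 h
    match e, h2 e (List.mem_cons_self) with
    | [u, v], _ =>
      have hstep := ufUnion_inv (u := u) (v := v) h
      have := ih (done ++ [[u, v]]) _ (fun e' he' => h2 e' (List.mem_cons_of_mem _ he')) hstep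
      simpa [List.append_assoc] using this

theorem buildB_inv (edges : List (List Int)) (h2 : ∀ e ∈ edges, e.length = 2) :
    UFI edges (Endp edges) (buildB edges).2 := by
  have h0 : UFI [] (Endp []) (PySem.Dict.empty, PySem.Dict.empty, (0 : Int)) := by
    refine ⟨fun x => by simp [PySem.Dict.contains_empty, Endp], ?_, ?_, ?_⟩
    · intro x c hx; simp [PySem.Dict.get?_empty] at hx
    · intro x c hx; simp [PySem.Dict.get?_empty] at hx
    · intro c l hl; simp [PySem.Dict.get?_empty] at hl
  have := ufFold_inv edges [] _ h2 h0
  rw [buildB, buildB_snd]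
  simpa using this

-- ===== A-side characterization (BFS visits exactly the connectivity class) =====

def Step (adj : PySem.Dict Int (List Int)) (V : List Int) (a b : Int) : Prop :=
  b ∈ adj.getD a [] ∧ b ∉ V

def SR (adj : PySem.Dict Int (List Int)) (V : List Int) (i x : Int) : Prop :=
  Relation.ReflTransGen (Step adj V) i x

-- what the neighbour-pushing fold does
theorem pushNew_spec (ns : List Int) (v : PySem.Set Int) (q : List Int) :
    (∀ x, x ∈ (pushNew (v, q) ns).1 ↔ x ∈ v ∨ x ∈ ns) ∧
    ∃ δ : List Int, (pushNew (v, q) ns).2 = q ++ δ ∧ δ.Nodup ∧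
      (∀ x, x ∈ δ ↔ x ∈ ns ∧ x ∉ v) := by
  induction ns generalizing v q with
  | nil =>
    exact ⟨fun x => by simp [pushNew], [], by simp [pushNew], by simp, fun x => by simp⟩
  | cons n ns ih =>
    have hstep : pushNew (v, q) (n :: ns) =
        pushNew (if PySem.Set.contains v n then (v, q) else (PySem.Set.add v n, q ++ [n])) ns := rfl
    by_cases hc : PySem.Set.contains v n = true
    · have hnv : n ∈ v := by rw [PySem.Set.contains_iff] at hc; exact hc
      rw [hstep, if_pos hc]
      obtain ⟨h1, δ, hq2, hnd, hδ⟩ := ih v q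
      refine ⟨fun x => ?_, δ, hq2, hnd, fun x => ?_⟩
      · rw [h1]
        constructor
        · rintro (h | h)
          · exact Or.inl h
          · exact Or.inr (List.mem_cons_of_mem _ h)
        · rintro (h | h)
          · exact Or.inl h
          · rcases List.mem_cons.1 h with rfl | h
            · exact Or.inl hnv
            · exact Or.inr h
      · rw [hδ]
        constructor
        · rintro ⟨h, h2⟩
          exact ⟨List.mem_cons_of_mem _ h, h2⟩
        · rintro ⟨h, h2⟩
          rcases List.mem_cons.1 h with rfl | h
          · exact absurd hnv h2
          · exact ⟨h, h2⟩
    · have hnv : n ∉ v := fun hm => hc (by rw [PySem.Set.contains_iff]; exact hm)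
      rw [hstep, if_neg hc]
      obtain ⟨h1, δ, hq2, hnd, hδ⟩ := ih (PySem.Set.add v n) (q ++ [n])
      refine ⟨fun x => ?_, n :: δ, by rw [hq2]; simp, ?_, fun x => ?_⟩
      · rw [h1, PySem.Set.mem_add]
        constructor
        · rintro ((h | rfl) | h)
          · exact Or.inl h
          · exact Or.inr List.mem_cons_self
          · exact Or.inr (List.mem_cons_of_mem _ h)
        · rintro (h | h)
          · exact Or.inl (Or.inl h)
          · rcases List.mem_cons.1 h with rfl | h
            · exact Or.inl (Or.inr rfl)
            · exact Or.inr h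
      · refine List.nodup_cons.2 ⟨fun hmem => ?_, hnd⟩
        exact ((hδ n).1 hmem).2 ((PySem.Set.mem_add _ _ _).2 (Or.inr rfl))
      · constructor
        · intro h
          rcases List.mem_cons.1 h with rfl | h
          · exact ⟨List.mem_cons_self, hnv⟩
          · have h' := (hδ x).1 h
            exact ⟨List.mem_cons_of_mem _ h'.1,
              fun hv => h'.2 ((PySem.Set.mem_add _ _ _).2 (Or.inl hv))⟩
        · rintro ⟨h, h2⟩
          by_cases hxn : x = n
          · exact hxn ▸ List.mem_cons_self
          · rcases List.mem_cons.1 h with rfl | h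
            · exact List.mem_cons_self
            · refine List.mem_cons_of_mem _ ((hδ x).2 ⟨h, fun hadd => ?_⟩)
              rcases (PySem.Set.mem_add _ _ _).1 hadd with h3 | h3
              · exact h2 h3
              · exact hxn h3

-- BFS worklist invariant
set_option maxHeartbeats 1000000 in
theorem bfsLoop_spec (adj : PySem.Dict Int (List Int)) (U : List Int) (h : AdjIn adj U)
    (V : List Int) (i : Int) (visited : PySem.Set Int) (q tree : List Int) :
    (∀ x, x ∈ visited ↔ x ∈ V ∨ x ∈ tree ∨ x ∈ q) →
    (tree ++ q).Nodup →
    (∀ x ∈ tree ++ q, SR adj V i x) →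
    (∀ x ∈ tree, ∀ n ∈ adj.getD x [], n ∈ visited) →
    i ∈ tree ++ q →
    (bfsLoop adj U h visited q tree).1.Nodup ∧
    (∀ x, x ∈ (bfsLoop adj U h visited q tree).1 ↔ SR adj V i x) ∧
    (∀ x, x ∈ (bfsLoop adj U h visited q tree).2 ↔ x ∈ V ∨ SR adj V i x) := by
  fun_induction bfsLoop adj U h visited q tree with
  | case1 visited tree =>
    intro I1 I2 I3 I4 I0
    simp only [List.append_nil] at I2 I3 I0
    have htree : ∀ x, x ∈ tree ↔ SR adj V i x := by
      intro x
      constructor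
      · exact fun hx => I3 x hx
      · intro hsr
        induction hsr with
        | refl => exact I0
        | tail hab hbc ih =>
          have hc := I4 _ ih _ hbc.1
          rcases (I1 _).1 hc with hV | hT | hq
          · exact absurd hV hbc.2
          · exact hT
          · cases hq
    refine ⟨I2, htree, fun x => ?_⟩
    rw [I1 x]
    constructor
    · rintro (h | h | h)
      · exact Or.inl h
      · exact Or.inr ((htree x).1 h)
      · cases h
    · rintro (h | h)
      · exact Or.inl h
      · exact Or.inr (Or.inl ((htree x).2 h))
  | case2 visited tree node rest ih =>
    intro I1 I2 I3 I4 I0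
    obtain ⟨Hv, δ, hq2, hδnd, hδm⟩ := pushNew_spec (adj.getD node []) visited rest
    have hVsub : ∀ x, x ∈ V → x ∈ visited := fun x hx => (I1 x).2 (Or.inl hx)
    have hXv : ∀ x, x ∈ tree ∨ x = node ∨ x ∈ rest → x ∈ visited := by
      rintro x (h | h | h)
      · exact (I1 x).2 (Or.inr (Or.inl h))
      · exact (I1 x).2 (Or.inr (Or.inr (by simp [h])))
      · exact (I1 x).2 (Or.inr (Or.inr (by simp [h])))
    have hSRnode : SR adj V i node := I3 node (by simp)
    have hδSR : ∀ x ∈ δ, SR adj V i x := by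
      intro x hx
      obtain ⟨hns, hnvis⟩ := (hδm x).1 hx
      exact Relation.ReflTransGen.tail hSRnode ⟨hns, fun hV => hnvis (hVsub x hV)⟩
    refine ih ?_ ?_ ?_ ?_ ?_
    · intro x
      rw [Hv x, I1 x, hq2]
      have hδx := hδm x
      have hIx := I1 x
      clear Hv hδm I1 I2 I3 I4 I0 hδnd hVsub hXv hSRnode hδSR hq2
      simp only [List.mem_append, List.mem_cons] at hδx hIx ⊢
      by_cases hxv : x ∈ visited
      · rcases (hIx.1 hxv) with h | h | h <;> tauto
      · tauto
    · rw [hq2]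
      have heq : (tree ++ [node]) ++ rest = tree ++ node :: rest := by simp
      have hassoc : (tree ++ [node]) ++ (rest ++ δ) = ((tree ++ [node]) ++ rest) ++ δ := by
        simp [List.append_assoc]
      rw [hassoc, heq]
      refine List.Nodup.append I2 hδnd ?_
      intro a ha hδa
      have hav : a ∈ visited := by
        rcases List.mem_append.1 ha with h | h
        · exact hXv a (Or.inl h)
        · rcases List.mem_cons.1 h with rfl | h
          · exact hXv a (Or.inr (Or.inl rfl))
          · exact hXv a (Or.inr (Or.inr h))
      exact ((hδm a).1 hδa).2 hav
    · rw [hq2]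
      intro x hx
      rcases List.mem_append.1 hx with h | h
      · rcases List.mem_append.1 h with h' | h'
        · exact I3 x (by simp [h'])
        · rcases List.mem_singleton.1 h' with rfl
          exact hSRnode
      · rcases List.mem_append.1 h with h' | h'
        · exact I3 x (by simp [h'])
        · exact hδSR x h'
    · intro x hx n hn
      rcases List.mem_append.1 hx with h | h
      · exact (Hv n).2 (Or.inl (I4 x h n hn))
      · rcases List.mem_singleton.1 h with rfl
        exact (Hv n).2 (Or.inr hn)
    · rw [hq2]
      rcases List.mem_append.1 I0 with h | h
      · simp [h]
      · rcases List.mem_cons.1 h with h' | h'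
        · simp [h']
        · simp [h']

theorem SR_not_mem {adj : PySem.Dict Int (List Int)} {V : List Int} {i a : Int}
    (h : SR adj V i a) (hi : i ∉ V) : a ∉ V := by
  induction h with
  | refl => exact hi
  | tail _ hbc _ => exact hbc.2

-- with visited closed under connectivity, BFS-reachability avoiding it IS connectivity
theorem SR_iff_conn {adj : PySem.Dict Int (List Int)} {edges : List (List Int)} {V : List Int}
    {i x : Int} (hadj : ∀ a b, (b ∈ adj.getD a []) ↔ ER edges a b)
    (hcl : ∀ a b, a ∈ V → Conn edges a b → b ∈ V) (hi : i ∉ V) :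
    SR adj V i x ↔ Conn edges i x := by
  constructor
  · intro h
    exact Relation.ReflTransGen.mono (fun a b hab => (hadj a b).1 hab.1) h
  · intro h
    induction h with
    | refl => exact Relation.ReflTransGen.refl
    | tail hxa hab ih =>
      rename_i a b
      have haV : a ∉ V := SR_not_mem ih hi
      have hbV : b ∉ V := by
        intro hbV
        exact haV (hcl b a hbV (conn_symm (Relation.ReflTransGen.single hab)))
      exact Relation.ReflTransGen.tail ih ⟨(hadj a b).2 hab, hbV⟩

-- ===== counting lemmas =====

def pA (line : PySem.Dict Int Int) (node : Int) : Bool :=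
  decide (PySem.Int.mod node 2 = PySem.Int.mod (line.getD node 0) 2)

def pC (line : PySem.Dict Int Int) (node : Int) : Bool :=
  decide (PySem.Int.mod node 2 = PySem.Int.mod (line.getD node 0 - 1) 2)

theorem pC_eq_not_pA (line : PySem.Dict Int Int) (node : Int) :
    pC line node = !pA line node := by
  simp only [pA, pC,
    PySem.Int.mod_eq_emod_of_pos (show (0 : Int) < 2 by norm_num)]
  by_cases h : node % 2 = line.getD node 0 % 2
  · have h2 : ¬ (node % 2 = (line.getD node 0 - 1) % 2) := by omega
    simp [decide_eq_true h, decide_eq_false h2]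
  · have h2 : node % 2 = (line.getD node 0 - 1) % 2 := by omega
    simp [decide_eq_true h2, decide_eq_false h]

theorem length_filter_not_add (l : List Int) (p : Int → Bool) :
    (l.filter (fun a => !p a)).length + (l.filter p).length = l.length := by
  induction l with
  | nil => rfl
  | cons a l ih => by_cases hp : p a <;> simp [List.filter_cons, hp] <;> omega

theorem foldl_pair_count (c1 c2 : Int → Prop) [DecidablePred c1] [DecidablePred c2] :
    ∀ (l : List Int) (x y : Int),
    l.foldl (fun p node =>
      ((if c1 node then p.1 + 1 else p.1), (if c2 node then p.2 + 1 else p.2))) (x, y) =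
    (x + ((l.filter (fun a => decide (c1 a))).length : Int),
     y + ((l.filter (fun a => decide (c2 a))).length : Int)) := by
  intro l
  induction l with
  | nil => intro x y; simp
  | cons a l ih =>
    intro x y
    rw [List.foldl_cons, ih, List.filter_cons, List.filter_cons]
    by_cases h1 : c1 a <;> by_cases h2 : c2 a <;>
      simp [h1, h2, Prod.ext_iff] <;> push_cast <;> omega

theorem countOE_eq (line : PySem.Dict Int Int) (tree : List Int) :
    countOE line tree =
      (((tree.filter (pA line)).length : Int), ((tree.filter (pC line)).length : Int)) := by
  unfold countOE
  refine (foldl_pair_count _ _ tree 0 0).trans ?_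
  simp only [zero_add]
  rfl

theorem countROE_eq (line : PySem.Dict Int Int) (tree : List Int) :
    countROE line tree =
      (((tree.filter (fun a => !pA line a)).length : Int),
       ((tree.filter (fun a => !pC line a)).length : Int)) := by
  unfold countROE
  refine (foldl_pair_count _ _ tree 0 0).trans ?_
  have h1 : tree.filter (fun a => decide (PySem.Int.mod a 2 ≠ PySem.Int.mod (line.getD a 0) 2))
      = tree.filter (fun a => !pA line a) := List.filter_congr (fun a _ => by simp [pA])
  have h2 : tree.filter (fun a => decide (PySem.Int.mod a 2 ≠ PySem.Int.mod (line.getD a 0 - 1) 2))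
      = tree.filter (fun a => !pC line a) := List.filter_congr (fun a _ => by simp [pC])
  rw [h1, h2]
  simp

-- ===== the outer-loop simulation =====

theorem one_step (adj : PySem.Dict Int (List Int)) (line deg comp : PySem.Dict Int Int)
    (members : PySem.Dict Int (List Int)) (nid : Int) (edges : List (List Int))
    (U : List Int) (hA : AdjIn adj U)
    (hadj : ∀ a b, (b ∈ adj.getD a []) ↔ ER edges a b)
    (hufi : UFI edges (Endp edges) (comp, members, nid))
    (hdeg : ∀ k, deg.getD k 0 = line.getD k 0)
    (sA sB : PySem.Set Int × Int × Int)
    (hmem : ∀ x, x ∈ sA.1 ↔ x ∈ sB.1)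
    (hcl : ∀ a b, a ∈ sA.1 → Conn edges a b → b ∈ sA.1)
    (hctr : sA.2 = sB.2) (i : Int) :
    (∀ x, x ∈ (stepA adj line U hA sA i).1 ↔ x ∈ (stepB deg comp members sB i).1) ∧
    (∀ a b, a ∈ (stepA adj line U hA sA i).1 → Conn edges a b →
      b ∈ (stepA adj line U hA sA i).1) ∧
    (stepA adj line U hA sA i).2 = (stepB deg comp members sB i).2 := by
  obtain ⟨g1, g2, g3, g4⟩ := hufi
  by_cases hi : i ∈ sA.1
  · have hcA : PySem.Set.contains sA.1 i = true := by
      rw [PySem.Set.contains_iff]; exact hi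
    have hcB : PySem.Set.contains sB.1 i = true := by
      rw [PySem.Set.contains_iff]; exact (hmem i).1 hi
    simp only [stepA, stepB, hcA, hcB, if_pos]
    exact ⟨hmem, hcl, hctr⟩
  · have hi' : i ∉ sB.1 := fun hh => hi ((hmem i).2 hh)
    have hcA : PySem.Set.contains sA.1 i = false := by
      cases hb : PySem.Set.contains sA.1 i
      · rfl
      · exact absurd (by rw [PySem.Set.contains_iff] at hb; exact hb) hi
    have hcB : PySem.Set.contains sB.1 i = false := by
      cases hb : PySem.Set.contains sB.1 i
      · rfl
      · exact absurd (by rw [PySem.Set.contains_iff] at hb; exact hb) hi'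
    simp only [stepA, stepB, hcA, hcB, Bool.false_eq_true, if_false]
    -- A's BFS component
    obtain ⟨hTnd, hTmem, hVmem⟩ :=
      bfsLoop_spec adj U hA sA.1 i (PySem.Set.add sA.1 i) [i] []
        (fun x => by rw [PySem.Set.mem_add]; simp; try tauto)
        (by simp)
        (by intro x hx; simp at hx; subst hx; exact Relation.ReflTransGen.refl)
        (by intro x hx; simp at hx)
        (by simp)
    set rA := bfsLoop adj U hA (PySem.Set.add sA.1 i) [i] [] with hrA
    have hSR : ∀ x, SR adj sA.1 i x ↔ Conn edges i x := fun x =>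
      SR_iff_conn hadj hcl hi
    -- B's component member list
    set group := (if comp.contains i then members.getD (comp.getD i 0) [] else [i])
      with hgroupdef
    have hgrp : group.Nodup ∧ (∀ y, y ∈ group ↔ Conn edges i y) := by
      by_cases hci : comp.contains i = true
      · have hgi : comp.get? i = some (comp.getD i 0) := by
          rw [PySem.Dict.contains_eq_isSome_get?] at hci
          cases hg : comp.get? i with
          | none => rw [hg] at hci; cases hci
          | some c => rw [PySem.Dict.getD_eq_get?_getD, hg]; rfl
        obtain ⟨l, hl, hnd, hcl'⟩ := g3 i _ hgi
        have : group = l := by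
          rw [hgroupdef, if_pos hci, PySem.Dict.getD_eq_get?_getD, hl]
          rfl
        rw [this]
        exact ⟨hnd, hcl'⟩
      · have hEi : ¬ Endp edges i := fun hE => hci ((g1 i).2 hE)
        have : group = [i] := by rw [hgroupdef, if_neg hci]
        rw [this]
        refine ⟨by simp, fun y => ?_⟩
        constructor
        · intro hy
          rw [List.mem_singleton.1 hy]
          exact Relation.ReflTransGen.refl
        · intro hconn
          rw [conn_of_not_endp hEi hconn]
          simp
    -- the two lists hold the same nodes
    have hperm : List.Perm rA.1 group := by
      refine (List.perm_ext_iff_of_nodup hTnd hgrp.1).2 (fun a => ?_)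
      rw [hTmem a, hSR a, hgrp.2 a]
    have hlen : rA.1.length = group.length := hperm.length_eq
    -- the match counters agree
    have hpAeq : ∀ x, (decide (PySem.Int.mod x 2 = PySem.Int.mod (deg.getD x 0) 2)) = pA line x := by
      intro x
      simp [pA, hdeg x]
    have hmB : (group.foldl (fun acc x =>
        if PySem.Int.mod x 2 = PySem.Int.mod (deg.getD x 0) 2 then acc + 1 else acc) (0 : Int))
        = ((group.filter (pA line)).length : Int) := by
      have hfun : (fun (acc : Int) (x : Int) =>
          if PySem.Int.mod x 2 = PySem.Int.mod (deg.getD x 0) 2 then acc + 1 else acc)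
          = (fun (acc : Int) (x : Int) => if (pA line x) = true then acc + 1 else acc) := by
        funext acc x
        rw [← hpAeq x]
        by_cases h : PySem.Int.mod x 2 = PySem.Int.mod (deg.getD x 0) 2 <;> simp [h]
      rw [hfun, PySem.List.foldl_count_if, List.countP_eq_length_filter]
      simp
    have hcnt : (rA.1.filter (pA line)).length = (group.filter (pA line)).length :=
      (hperm.filter _).length_eq
    have hnotC : (rA.1.filter (pC line)).length + (rA.1.filter (pA line)).length
        = rA.1.length := by
      rw [List.filter_congr (fun a _ => pC_eq_not_pA line a)]
      exact length_filter_not_add rA.1 (pA line)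
    have hnotA : (rA.1.filter (fun a => !pA line a)).length + (rA.1.filter (pA line)).length
        = rA.1.length := length_filter_not_add rA.1 (pA line)
    have hnotCC : (rA.1.filter (fun a => !pC line a)).length = (rA.1.filter (pA line)).length := by
      refine congrArg List.length (List.filter_congr (fun a _ => ?_))
      rw [pC_eq_not_pA, Bool.not_not]
    have hc1 : (countOE line rA.1).1 = ((rA.1.filter (pA line)).length : Int) := by
      rw [countOE_eq]
    have hc2 : (countOE line rA.1).2 = ((rA.1.filter (pC line)).length : Int) := by
      rw [countOE_eq]
    have hr1 : (countROE line rA.1).1 = ((rA.1.filter (fun a => !pA line a)).length : Int) := by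
      rw [countROE_eq]
    have hr2 : (countROE line rA.1).2 = ((rA.1.filter (fun a => !pC line a)).length : Int) := by
      rw [countROE_eq]
    -- t-condition: both sides say "exactly one parity match"
    have ht : (if (countOE line rA.1).1 = 1 ∧ (countOE line rA.1).2 = (rA.1.length : Int) - 1
          then sA.2.1 + 1 else sA.2.1) =
        (if (group.foldl (fun acc x =>
            if PySem.Int.mod x 2 = PySem.Int.mod (deg.getD x 0) 2 then acc + 1 else acc)
            (0 : Int)) = 1 then sB.2.1 + 1 else sB.2.1) := by
      rw [hc1, hc2, hmB, ← hcnt, hctr]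
      by_cases hc : ((rA.1.filter (pA line)).length : Int) = 1
      · rw [if_pos ⟨hc, by omega⟩, if_pos hc]
      · rw [if_neg (fun hh => hc hh.1), if_neg hc]
    -- rt-condition: both sides say "exactly one parity mismatch"
    have hrt : (if (countROE line rA.1).1 = 1 ∧ (countROE line rA.1).2 = (rA.1.length : Int) - 1
          then sA.2.2 + 1 else sA.2.2) =
        (if (group.foldl (fun acc x =>
            if PySem.Int.mod x 2 = PySem.Int.mod (deg.getD x 0) 2 then acc + 1 else acc)
            (0 : Int)) = (group.length : Int) - 1 then sB.2.2 + 1 else sB.2.2) := by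
      rw [hr1, hr2, hmB, ← hcnt, ← hlen, hnotCC, hctr]
      by_cases hc : ((rA.1.filter (pA line)).length : Int) = (rA.1.length : Int) - 1
      · rw [if_pos ⟨by omega, hc⟩, if_pos hc]
      · rw [if_neg (fun hh => hc hh.2), if_neg hc]
    refine ⟨fun x => ?_, fun a b ha hconn => ?_, ?_⟩
    · show x ∈ rA.2 ↔ x ∈ PySem.Set.update sB.1 group
      rw [hVmem x, PySem.Set.mem_update, hSR x, ← hgrp.2 x, hmem x]
    · show b ∈ rA.2
      have ha' : a ∈ rA.2 := ha
      rw [hVmem] at ha' ⊢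
      rcases ha' with h | h
      · exact Or.inl (hcl a b h hconn)
      · refine Or.inr ((hSR b).2 (conn_trans ((hSR a).1 h) hconn))
    · exact Prod.ext ht hrt

-- ===== VERDICT (by name: the statement is the Claim_ definition above) =====
theorem solution_spec : Claim_equal_solution := by
  intro nodes edges _ hpre
  show solution nodes edges = solution_alt nodes edges
  have hadj : ∀ a b, (b ∈ (buildA edges).1.getD a []) ↔ ER edges a b := memA edges
  have hufi : UFI edges (Endp edges)
      ((buildB edges).2.1, (buildB edges).2.2.1, (buildB edges).2.2.2) := buildB_inv edges hpre
  have hdeg : ∀ k, (buildB edges).1.getD k 0 = (buildA edges).2.getD k 0 := by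
    intro k
    rw [degB_eq_lineA]
  have main : ∀ (ns : List Int) (sA sB : PySem.Set Int × Int × Int),
      (∀ x, x ∈ sA.1 ↔ x ∈ sB.1) →
      (∀ a b, a ∈ sA.1 → Conn edges a b → b ∈ sA.1) →
      sA.2 = sB.2 →
      (ns.foldl (stepA (buildA edges).1 (buildA edges).2 (edges.flatMap id)
        (adjIn_buildA edges)) sA).2
        = (ns.foldl (stepB (buildB edges).1 (buildB edges).2.1 (buildB edges).2.2.1) sB).2 := by
    intro ns
    induction ns with
    | nil => intro sA sB _ _ h3; exact h3
    | cons i ns ih =>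
      intro sA sB h1 h2 h3
      obtain ⟨q1, q2, q3⟩ := one_step (buildA edges).1 (buildA edges).2 (buildB edges).1
        (buildB edges).2.1 (buildB edges).2.2.1 (buildB edges).2.2.2 edges (edges.flatMap id)
        (adjIn_buildA edges) hadj hufi hdeg sA sB h1 h2 h3 i
      exact ih _ _ q1 q2 q3
  have h := main nodes (PySem.Set.empty, 0, 0) (PySem.Set.empty, 0, 0)
    (fun x => Iff.rfl) (fun a b ha _ => by cases ha) rfl
  show [(List.foldl (stepA (buildA edges).1 (buildA edges).2 (edges.flatMap id)
      (adjIn_buildA edges)) (PySem.Set.empty, 0, 0) nodes).2.1,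
    (List.foldl (stepA (buildA edges).1 (buildA edges).2 (edges.flatMap id)
      (adjIn_buildA edges)) (PySem.Set.empty, 0, 0) nodes).2.2] =
    [(List.foldl (stepB (buildB edges).1 (buildB edges).2.1 (buildB edges).2.2.1)
      (PySem.Set.empty, 0, 0) nodes).2.1,
    (List.foldl (stepB (buildB edges).1 (buildB edges).2.1 (buildB edges).2.2.1)
      (PySem.Set.empty, 0, 0) nodes).2.2]
  rw [h]
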